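-- pv_equiv track=rewrite | github.com/jgbcq/echo | SHA256.py | rightshift
-- ===== SOURCE A (Python) =====
-- def STRhex2bin(word): # prend une string hexadécimale et retourne sa forme binaire.
--   binSTR = ''
--   for i in range(len(word)):
--     binSTR = binSTR + bin(int(word[i:(i+1)], 16))[2:].zfill(4)
--   return binSTR
--
-- def STRbin2hex(word): # prend une string binaire et retourne sa forme hexadécimale. Restriction: la longueur de string originale en bits doit être un multiple de 4
--   hexSTR = ''
--   for i in range(len(word)//4):
--     hexSTR = hexSTR + hex(int(word[i*4:(i+1)*4], 2))[2:]
--   return hexSTR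
--
-- def rightshift(a,n): # prend une string hexadécimale a et un entier n et retourne la string hexadécimale correspondant au résultat de l'addition rightshift x
--   a = STRhex2bin(a)
--   res = ''
--   for i in range(len(a)):
--     if i < n:
--       res = res + '0'
--     else:
--       res = res + a[i-n]
--   return STRbin2hex(res)
-- ===== SOURCE B (Python) =====
-- def rightshift(a, n):
--     # digit-level shift: split n into whole hex digits and a sub-digit bit shift,
--     # compute each output digit from the two source digits that overlap it
--     hexd = '0123456789abcdef'
--     q, r = divmod(n, 4)
--     def dig(i):
--         if i < 0:
--             return 0
--         d = a[i].lower()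
--         return ord(d) - 48 if d <= '9' else ord(d) - 87
--     return ''.join(hexd[((dig(i - q - 1) * 16 + dig(i - q)) >> r) & 15]
--                    for i in range(len(a)))
-- ===== Notes on version B (the rewrite author's own statement) =====
-- stated objective: faster
-- what changed: Replaces A's build-a-4L-char-bit-string / copy-bits-one-by-one / rebuild-hex pipeline by a direct digit-level shift: n is split into whole hex digits (n//4) and a sub-digit bit shift (n%4), and each output digit is computed in one step from the two input digits that overlap it.
import Mathlib
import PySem

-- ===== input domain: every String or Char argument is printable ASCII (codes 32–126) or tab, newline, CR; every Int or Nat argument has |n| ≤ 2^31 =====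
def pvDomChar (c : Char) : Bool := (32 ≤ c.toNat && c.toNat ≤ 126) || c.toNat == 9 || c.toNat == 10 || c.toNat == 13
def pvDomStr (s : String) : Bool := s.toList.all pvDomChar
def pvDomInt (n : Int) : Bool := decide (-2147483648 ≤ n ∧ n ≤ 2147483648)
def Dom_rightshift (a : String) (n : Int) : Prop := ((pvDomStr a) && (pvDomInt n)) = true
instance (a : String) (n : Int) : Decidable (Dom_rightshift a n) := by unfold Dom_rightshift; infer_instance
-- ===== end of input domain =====

-- B replaces A's bin-string build / bit-by-bit shift / hex-string rebuild by a digit-level shift: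
-- each output hex digit is computed directly from the two input digits that overlap it after
-- splitting n into whole hex digits (n // 4) and a sub-digit bit shift (n % 4). Return value only.

-- ===== PORT A =====
-- hex value of one hex digit character (int(c, 16); 0 on junk — Pre_ admits hex digits only)
def hexVal (c : Char) : Nat :=
  if 48 ≤ c.toNat ∧ c.toNat ≤ 57 then c.toNat - 48
  else if 97 ≤ c.toNat ∧ c.toNat ≤ 102 then c.toNat - 87
  else if 65 ≤ c.toNat ∧ c.toNat ≤ 70 then c.toNat - 55
  else 0

-- int(s, 16): exact for nonempty all-hex-digit strings (Pre_ admits only those; Python raises elsewhere)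
def intBase16 (s : List Char) : Nat := s.foldl (fun acc c => 16 * acc + hexVal c) 0

-- int(s, 2): exact for nonempty all-bit strings (only applied to STRhex2bin output)
def intBase2 (s : List Char) : Nat := s.foldl (fun acc c => 2 * acc + (if c = '1' then 1 else 0)) 0

-- lowercase digit character for d < 16 (Python's bin/hex digit rendering)
def hexChar (d : Nat) : Char := if d < 10 then Char.ofNat (48 + d) else Char.ofNat (87 + d)

-- bin(v)[2:] (nonnegative v; fuel = v suffices since v is halved each step)
def pyBinAux : Nat → Nat → List Char → List Char
  | 0, _, acc => acc
  | fuel + 1, v, acc =>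
      if v = 0 then acc else pyBinAux fuel (v / 2) ((if v % 2 = 1 then '1' else '0') :: acc)

def pyBin (v : Nat) : List Char := if v = 0 then ['0'] else pyBinAux v v []

-- s.zfill(w) (no sign handling needed: only applied to bin output, which has no sign)
def pyZfill (s : List Char) (w : Nat) : List Char := List.replicate (w - s.length) '0' ++ s

-- hex(v)[2:] (nonnegative v)
def natToHexAux : Nat → Nat → List Char → List Char
  | 0, _, acc => acc
  | fuel + 1, v, acc =>
      if v = 0 then acc else natToHexAux fuel (v / 16) (hexChar (v % 16) :: acc)

def natToHex (v : Nat) : List Char := if v = 0 then ['0'] else natToHexAux v v []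

def STRhex2binA (word : List Char) : List Char :=
  (List.range word.length).foldl
    (fun binSTR (i : Nat) =>
      binSTR ++ pyZfill (pyBin (intBase16 (PySem.List.slice word (some (i : Int)) (some ((i : Int) + 1))))) 4) []

def STRbin2hexA (word : List Char) : List Char :=
  (List.range (word.length / 4)).foldl
    (fun hexSTR (i : Nat) =>
      hexSTR ++ natToHex (intBase2 (PySem.List.slice word (some ((i : Int) * 4)) (some (((i : Int) + 1) * 4))))) []

def rightshift (a : String) (n : Int) : String :=
  let b := STRhex2binA a.toList
  let res := (List.range b.length).foldl
    (fun res (i : Nat) => if (i : Int) < n then res ++ ['0'] else res ++ [PySem.List.pyGetD b ((i : Int) - n) '0']) []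
  String.ofList (STRbin2hexA res)

-- ===== PORT B =====
-- dig(i) of Source B: value of hex digit a[i], 0 for i < 0 (exact for hex digits, which Pre_ admits)
def digB (a : List Char) (i : Int) : Nat :=
  if i < 0 then 0
  else
    let d := PySem.Chars.lowerChar (PySem.List.pyGetD a i '0')
    if d ≤ '9' then d.toNat - 48 else d.toNat - 87

-- the digit table hexd = '0123456789abcdef'
def hexdB : List Char := ['0', '1', '2', '3', '4', '5', '6', '7', '8', '9', 'a', 'b', 'c', 'd', 'e', 'f']

def rightshift_alt (a : String) (n : Int) : String :=
  let q := PySem.Int.floordiv n 4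
  let r := PySem.Int.mod n 4
  String.ofList ((List.range a.toList.length).map (fun (i : Nat) =>
    hexdB.getD (((digB a.toList ((i : Int) - q - 1) * 16 + digB a.toList ((i : Int) - q)) >>> r.toNat) % 16) '0'))

-- ===== PRECONDITION & SPEC =====
def isHexChar (c : Char) : Bool :=
  (48 ≤ c.toNat && c.toNat ≤ 57) || (97 ≤ c.toNat && c.toNat ≤ 102) || (65 ≤ c.toNat && c.toNat ≤ 70)

-- Pre_ excludes exactly the inputs where A raises: a non-hex character (ValueError in int(·,16)),
-- and n < 0 with a nonempty (a[i-n] IndexError).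
def Pre_rightshift (a : String) (n : Int) : Prop :=
  a.toList.all isHexChar = true ∧ (a.toList = [] ∨ 0 ≤ n)
instance (a : String) (n : Int) : Decidable (Pre_rightshift a n) := by
  unfold Pre_rightshift; infer_instance

def pvWitness_rightshift : String × Int := ("1a2F", 5)

def Spec_rightshift (a : String) (n : Int) (out : String) : Prop := out = rightshift_alt a n
instance (a : String) (n : Int) (out : String) : Decidable (Spec_rightshift a n out) := by
  unfold Spec_rightshift; infer_instance

-- ===== CLAIM (what is proved, stated in full; the proofs are below) =====
def Claim_equal_rightshift : Prop :=
  ∀ (a : String) (n : Int), Dom_rightshift a n → Pre_rightshift a n →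
    Spec_rightshift a n (rightshift a n)

-- ===== LEMMAS AND PROOFS =====

-- fixed-width base-2 representation, MSB first (extra high bits of v are dropped)
def binPad : Nat → Nat → List Char
  | 0, _ => []
  | w + 1, v => binPad w (v / 2) ++ [if v % 2 = 1 then '1' else '0']

-- fixed-width base-16 representation, MSB first
def hexPad : Nat → Nat → List Char
  | 0, _ => []
  | w + 1, v => hexPad w (v / 16) ++ [hexChar (v % 16)]

theorem length_binPad (w v : Nat) : (binPad w v).length = w := by
  induction w generalizing v with
  | zero => rfl
  | succ w ih => simp [binPad, ih]

theorem length_hexPad (w v : Nat) : (hexPad w v).length = w := by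
  induction w generalizing v with
  | zero => rfl
  | succ w ih => simp [hexPad, ih]

theorem binPad_zero (w : Nat) : binPad w 0 = List.replicate w '0' := by
  induction w with
  | zero => rfl
  | succ w ih => simp [binPad, ih, List.replicate_succ']

theorem binPad_split (w k v : Nat) :
    binPad (w + k) v = binPad w (v / 2 ^ k) ++ binPad k (v % 2 ^ k) := by
  induction k generalizing v with
  | zero => simp [binPad]
  | succ k ih =>
    show binPad ((w + k) + 1) v = _
    rw [binPad, ih]
    have h1 : v / 2 / 2 ^ k = v / 2 ^ (k + 1) := by
      rw [Nat.div_div_eq_div_mul, ← pow_succ']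
    have h2 : v / 2 % 2 ^ k = v % 2 ^ (k + 1) / 2 := by
      rw [pow_succ']
      rw [Nat.mod_mul_right_div_self]
    have h3 : v % 2 = v % 2 ^ (k + 1) % 2 := by
      rw [Nat.mod_mod_of_dvd _ (dvd_pow_self 2 (Nat.succ_ne_zero k))]
    rw [h1, h2, h3, List.append_assoc]
    rfl

theorem binPad_pad (m j u : Nat) (h : u < 2 ^ m) :
    binPad (m + j) u = List.replicate j '0' ++ binPad m u := by
  rw [Nat.add_comm, binPad_split, Nat.div_eq_of_lt h, Nat.mod_eq_of_lt h, binPad_zero]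

theorem binPad_take (w k v : Nat) : binPad w (v / 2 ^ k) = (binPad (w + k) v).take w := by
  rw [binPad_split]
  rw [List.take_append_of_le_length (by rw [length_binPad]),
    List.take_of_length_le (by rw [length_binPad])]

-- per-digit facts, by computation
theorem bits4_eq (d : Nat) (h : d < 16) : pyZfill (pyBin d) 4 = binPad 4 d := by
  interval_cases d <;> decide

theorem intBase2_binPad4 (d : Nat) (h : d < 16) : intBase2 (binPad 4 d) = d := by
  interval_cases d <;> decide

theorem natToHex_lt16 (d : Nat) (h : d < 16) : natToHex d = [hexChar d] := by
  interval_cases d <;> decide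

theorem hexVal_lt (c : Char) : hexVal c < 16 := by
  unfold hexVal
  split_ifs <;> omega

theorem intBase16_append (l : List Char) (c : Char) :
    intBase16 (l ++ [c]) = 16 * intBase16 l + hexVal c := by
  simp [intBase16, List.foldl_append]

theorem intBase16_lt (l : List Char) : intBase16 l < 16 ^ l.length := by
  induction l using List.reverseRecOn with
  | nil => simp [intBase16]
  | append_singleton l c ih =>
    rw [intBase16_append]
    have := hexVal_lt c
    simp only [List.length_append, List.length_singleton, pow_succ]
    omega

-- a one-character slice in range is the character
theorem slice_one (l : List Char) (i : Nat) (h : i < l.length) :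
    PySem.List.slice l (some (i : Int)) (some ((i : Int) + 1)) = [l[i]] := by
  have : ((i : Int) + 1) = ((i + 1 : Nat) : Int) := by push_cast; ring
  rw [this, PySem.List.slice_natCast]
  rw [show i + 1 - i = 1 from by omega, List.take_one, List.head?_drop]
  simp [h]

-- Step A1: STRhex2bin produces the 4·len-bit representation of int(a,16)
theorem hex2bin_eq (l : List Char) :
    STRhex2binA l = binPad (4 * l.length) (intBase16 l) := by
  induction l using List.reverseRecOn with
  | nil => rfl
  | append_singleton l c ih =>
    unfold STRhex2binA
    rw [List.length_append, List.length_singleton, List.range_succ, List.foldl_append]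
    have hcongr :
        (List.range l.length).foldl
          (fun binSTR (i : Nat) =>
            binSTR ++ pyZfill (pyBin (intBase16 (PySem.List.slice (l ++ [c]) (some (i : Int)) (some ((i : Int) + 1))))) 4) [] =
        STRhex2binA l := by
      unfold STRhex2binA
      apply PySem.List.foldl_congr_mem
      intro acc i hi
      have hi' : i < l.length := List.mem_range.mp hi
      rw [slice_one _ _ (by simp; omega), slice_one _ _ hi']
      congr 2
      rw [List.getElem_append_left hi']
    rw [hcongr, ih]
    simp only [List.foldl_cons, List.foldl_nil]
    rw [slice_one _ _ (by simp), List.getElem_append_right (by omega)]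
    simp only [Nat.sub_self, List.getElem_singleton]
    have h1 : intBase16 [c] = hexVal c := by simp [intBase16]
    rw [h1, bits4_eq _ (hexVal_lt c), intBase16_append]
    have hsplit : binPad (4 * (l.length + 1)) (16 * intBase16 l + hexVal c)
        = binPad (4 * l.length) ((16 * intBase16 l + hexVal c) / 2 ^ 4)
          ++ binPad 4 ((16 * intBase16 l + hexVal c) % 2 ^ 4) := by
      rw [show 4 * (l.length + 1) = 4 * l.length + 4 from by ring]
      exact binPad_split _ 4 _
    have hv := hexVal_lt c
    rw [show (2 : Nat) ^ 4 = 16 from by norm_num] at hsplit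
    have e1 : (16 * intBase16 l + hexVal c) / 16 = intBase16 l := by omega
    have e2 : (16 * intBase16 l + hexVal c) % 16 = hexVal c := by omega
    rw [hsplit, e1, e2]

-- Step A2: the shifting loop produces the 4·len-bit representation of v >> n
theorem res_eq (w v : Nat) (n : Int) (hn : 0 ≤ n) (hv : v < 2 ^ w) :
    (List.range w).foldl
      (fun res (i : Nat) => if (i : Int) < n then res ++ ['0']
                    else res ++ [PySem.List.pyGetD (binPad w v) ((i : Int) - n) '0']) [] =
    binPad w (v / 2 ^ n.toNat) := by
  set b := binPad w v with hb
  have hlen : b.length = w := length_binPad w v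
  have hstep : (fun (res : List Char) (i : Nat) =>
      if (i : Int) < n then res ++ ['0'] else res ++ [PySem.List.pyGetD b ((i : Int) - n) '0'])
      = fun res (i : Nat) => res ++ [if (i : Int) < n then '0' else PySem.List.pyGetD b ((i : Int) - n) '0'] := by
    funext res i; split <;> rfl
  rw [hstep, PySem.List.foldl_append_singleton_eq_map, List.nil_append]
  set nN := n.toNat with hnN
  by_cases hcase : nN ≤ w
  · have hdiv : v / 2 ^ nN < 2 ^ (w - nN) := by
      apply Nat.div_lt_of_lt_mul
      calc v < 2 ^ w := hv
        _ = 2 ^ nN * 2 ^ (w - nN) := by rw [← pow_add]; congr 1; omega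
    have hpad : binPad w (v / 2 ^ nN) = List.replicate nN '0' ++ binPad (w - nN) (v / 2 ^ nN) := by
      have h := binPad_pad (w - nN) nN (v / 2 ^ nN) hdiv
      rw [show w - nN + nN = w from by omega] at h
      exact h
    have htake : binPad (w - nN) (v / 2 ^ nN) = b.take (w - nN) := by
      have h := binPad_take (w - nN) nN v
      rw [show w - nN + nN = w from by omega] at h
      rw [h, hb]
    rw [hpad, htake]
    apply List.ext_getElem
    · simp [hlen]; omega
    · intro i h1 h2
      simp only [List.getElem_map, List.getElem_range]
      have hi : i < w := by simpa using h1
      by_cases hlt : i < nN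
      · rw [if_pos (by omega), List.getElem_append_left (by simp; omega)]
        simp
      · rw [if_neg (by omega)]
        have h0 : (0 : Int) ≤ (i : Int) - n := by omega
        have hrange : ((i : Int) - n) < (b.length : Int) := by rw [hlen]; omega
        rw [PySem.List.pyGetD_eq_getElem b '0' h0 hrange]
        rw [List.getElem_append_right (by simp; omega)]
        rw [List.getElem_take]
        congr 1
        simp
        omega
  · -- n ≥ w: every bit is zero
    have : ∀ i ∈ List.range w, (if (i : Int) < n then '0'
        else PySem.List.pyGetD b ((i : Int) - n) '0') = '0' := by
      intro i hi
      have : i < w := List.mem_range.mp hi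
      rw [if_pos (by omega)]
    rw [List.map_congr_left this]
    have hzero : v / 2 ^ nN = 0 := by
      apply Nat.div_eq_of_lt
      calc v < 2 ^ w := hv
        _ ≤ 2 ^ nN := Nat.pow_le_pow_right (by norm_num) (by omega)
    rw [hzero, binPad_zero]
    simp [List.map_const']

-- Step A3: STRbin2hex of a 4·m-bit representation is the m-digit hex representation
theorem bin2hex_eq (m : Nat) : ∀ u : Nat, u < 16 ^ m → STRbin2hexA (binPad (4 * m) u) = hexPad m u := by
  induction m with
  | zero =>
    intro u hu
    simp [STRbin2hexA, binPad, hexPad]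
  | succ m ih =>
    intro u hu
    have hsplit : binPad (4 * (m + 1)) u = binPad (4 * m) (u / 16) ++ binPad 4 (u % 16) := by
      rw [show 4 * (m + 1) = 4 * m + 4 from by ring, binPad_split,
        show (2 : Nat) ^ 4 = 16 from by norm_num]
    set x := binPad (4 * m) (u / 16) with hx
    set y := binPad 4 (u % 16) with hy
    have hlx : x.length = 4 * m := length_binPad _ _
    have hly : y.length = 4 := length_binPad _ _
    unfold STRbin2hexA
    rw [hsplit]
    have hwlen : ((x ++ y).length) / 4 = m + 1 := by
      simp [hlx, hly]
    rw [hwlen, List.range_succ, List.foldl_append]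
    have hcongr :
        (List.range m).foldl
          (fun hexSTR (i : Nat) =>
            hexSTR ++ natToHex (intBase2 (PySem.List.slice (x ++ y) (some ((i : Int) * 4)) (some (((i : Int) + 1) * 4))))) [] =
        (List.range (x.length / 4)).foldl
          (fun hexSTR (i : Nat) =>
            hexSTR ++ natToHex (intBase2 (PySem.List.slice x (some ((i : Int) * 4)) (some (((i : Int) + 1) * 4))))) [] := by
      rw [show x.length / 4 = m from by simp [hlx]]
      apply PySem.List.foldl_congr_mem
      intro acc i hi
      have hi' : i < m := List.mem_range.mp hi
      have e1 : ((i : Int) * 4) = ((i * 4 : Nat) : Int) := by push_cast; ring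
      have e2 : (((i : Int) + 1) * 4) = ((i * 4 + 4 : Nat) : Int) := by push_cast; ring
      rw [e1, e2, show ((i * 4 + 4 : Nat) : Int) = ((i * 4 : Nat) : Int) + ((4 : Nat) : Int) from by push_cast; ring]
      rw [PySem.List.slice_natCast_add, PySem.List.slice_natCast_add]
      congr 2
      rw [List.drop_append_of_le_length (by omega)]
      rw [List.take_append_of_le_length (by simp [hlx]; omega)]
    rw [hcongr]
    have ihx : (List.range (x.length / 4)).foldl
        (fun hexSTR (i : Nat) =>
          hexSTR ++ natToHex (intBase2 (PySem.List.slice x (some ((i : Int) * 4)) (some (((i : Int) + 1) * 4))))) [] =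
        hexPad m (u / 16) := by
      have := ih (u / 16) (by
        have : u < 16 ^ m * 16 := by rw [← pow_succ]; exact hu
        exact Nat.div_lt_of_lt_mul (by omega))
      unfold STRbin2hexA at this
      rw [← hx] at this
      exact this
    rw [ihx]
    simp only [List.foldl_cons, List.foldl_nil]
    have e1 : ((m : Int) * 4) = ((4 * m : Nat) : Int) := by push_cast; ring
    have e2 : (((m : Int) + 1) * 4) = ((4 * m : Nat) : Int) + ((4 : Nat) : Int) := by push_cast; ring
    rw [e1, e2, PySem.List.slice_natCast_add]
    rw [show (4 * m : Nat) = x.length from hlx.symm, List.drop_left]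
    rw [List.take_of_length_le (by omega)]
    rw [intBase2_binPad4 _ (Nat.mod_lt _ (by norm_num)),
      natToHex_lt16 _ (Nat.mod_lt _ (by norm_num))]
    rfl

-- A's pipeline in closed form: the L-digit hex representation of v >> n
theorem A_eq_hexPad (a : String) (n : Int) (hn : 0 ≤ n) :
    rightshift a n =
      String.ofList (hexPad a.toList.length (intBase16 a.toList / 2 ^ n.toNat)) := by
  simp only [rightshift]
  have hvlt : intBase16 a.toList < 16 ^ a.toList.length := intBase16_lt _
  have hvlt2 : intBase16 a.toList < 2 ^ (4 * a.toList.length) := by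
    rw [show (2 : Nat) ^ (4 * a.toList.length) = 16 ^ a.toList.length from by
      rw [pow_mul]; norm_num]
    exact hvlt
  rw [hex2bin_eq, length_binPad, res_eq _ _ _ hn hvlt2]
  rw [bin2hex_eq _ _ (lt_of_le_of_lt (Nat.div_le_self _ _) hvlt)]

-- ---- B side ----

-- Char order in terms of code points
theorem charLe (c d : Char) : c ≤ d ↔ c.toNat ≤ d.toNat := by
  rw [Char.le_def]
  exact UInt32.le_iff_toNat_le

theorem lowerChar_upper (c : Char) (h : 65 ≤ c.toNat ∧ c.toNat ≤ 90) :
    (PySem.Chars.lowerChar c).toNat = c.toNat + 32 := by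
  unfold PySem.Chars.lowerChar PySem.Chars.isupper
  rw [if_pos, Char.toNat_ofNat, if_pos (Or.inl (by omega))]
  simp only [Bool.and_eq_true, decide_eq_true_eq, charLe]
  constructor <;> simp <;> omega

theorem lowerChar_nonupper (c : Char) (h : ¬ (65 ≤ c.toNat ∧ c.toNat ≤ 90)) :
    PySem.Chars.lowerChar c = c := by
  unfold PySem.Chars.lowerChar PySem.Chars.isupper
  rw [if_neg]
  simp only [Bool.and_eq_true, decide_eq_true_eq, charLe]
  simp
  intro h1
  omega

-- B's dig agrees with int(c, 16) on hex digit characters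
theorem digB_eq_hexVal (l : List Char) (j : Nat) (_hj : j < l.length)
    (hhex : isHexChar (l.getD j '0') = true) :
    digB l (j : Int) = hexVal (l.getD j '0') := by
  unfold digB
  rw [if_neg (by omega)]
  rw [PySem.List.pyGetD_natCast]
  set c := l.getD j '0' with hc
  unfold isHexChar at hhex
  simp only [Bool.or_eq_true, Bool.and_eq_true, decide_eq_true_eq] at hhex
  rcases hhex with (h | h) | h
  · -- '0'..'9'
    rw [lowerChar_nonupper c (by omega)]
    rw [if_pos (by rw [charLe]; show c.toNat ≤ 57; omega)]
    unfold hexVal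
    rw [if_pos h]
  · -- 'a'..'f'
    rw [lowerChar_nonupper c (by omega)]
    rw [if_neg (by rw [charLe]; show ¬ c.toNat ≤ 57; omega)]
    unfold hexVal
    rw [if_neg (by omega), if_pos h]
  · -- 'A'..'F'
    have hup := lowerChar_upper c (by omega)
    rw [if_neg (by rw [charLe, hup]; show ¬ c.toNat + 32 ≤ 57; omega)]
    rw [hup]
    unfold hexVal
    rw [if_neg (by omega), if_neg (by omega), if_pos (by omega)]
    omega

theorem digB_neg (l : List Char) (i : Int) (h : i < 0) : digB l i = 0 := by
  unfold digB
  rw [if_pos h]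

-- the table lookup renders digits the same way as hexChar
theorem hexdB_getD (d : Nat) (h : d < 16) : hexdB.getD d '0' = hexChar d := by
  interval_cases d <;> decide

-- digit j of the L-digit value: v / 16^(L-1-j) % 16
theorem digit_intBase16 (l : List Char) : ∀ j : Nat, j < l.length →
    intBase16 l / 16 ^ (l.length - 1 - j) % 16 = hexVal (l.getD j '0') := by
  induction l using List.reverseRecOn with
  | nil => intro j hj; simp at hj
  | append_singleton l c ih =>
    intro j hj
    rw [intBase16_append]
    have hvc := hexVal_lt c
    by_cases hlast : j = l.length
    · subst hlast
      simp only [List.length_append, List.length_singleton]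
      rw [show l.length + 1 - 1 - l.length = 0 from by omega, pow_zero, Nat.div_one]
      rw [List.getD_eq_getElem _ _ (by simp), List.getElem_append_right (by omega)]
      simp only [Nat.sub_self, List.getElem_singleton]
      omega
    · have hj' : j < l.length := by
        simp only [List.length_append, List.length_singleton] at hj
        omega
      simp only [List.length_append, List.length_singleton]
      rw [show l.length + 1 - 1 - j = (l.length - 1 - j) + 1 from by omega, pow_succ']
      rw [← Nat.div_div_eq_div_mul,
        show (16 * intBase16 l + hexVal c) / 16 = intBase16 l from by omega]
      rw [ih j hj']
      rw [List.getD_eq_getElem _ _ hj', List.getD_eq_getElem _ _ (by simp; omega),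
        List.getElem_append_left hj']

-- 16^k as a power of 2
theorem pow16 (k : Nat) : (16 : Nat) ^ k = 2 ^ (4 * k) := by
  rw [show (16 : Nat) = 2 ^ 4 from by norm_num, ← pow_mul]

-- digit i of hexPad w u
theorem hexPad_getD (w : Nat) : ∀ (u i : Nat), i < w →
    (hexPad w u).getD i '0' = hexChar (u / 16 ^ (w - 1 - i) % 16) := by
  induction w with
  | zero => intro u i h; omega
  | succ m ih =>
    intro u i h
    rw [hexPad]
    by_cases hi : i < m
    · have e : (hexPad m (u / 16) ++ [hexChar (u % 16)]).getD i '0'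
          = (hexPad m (u / 16)).getD i '0' := by
        rw [List.getD_eq_getElem _ _ (by simpa [length_hexPad] using h),
          List.getElem_append_left (by rw [length_hexPad]; exact hi),
          List.getD_eq_getElem _ _ (by rw [length_hexPad]; exact hi)]
      rw [e, ih (u / 16) i hi, Nat.div_div_eq_div_mul, ← pow_succ',
        show m - 1 - i + 1 = m + 1 - 1 - i from by omega]
    · have hi' : i = m := by omega
      subst hi'
      rw [List.getD_eq_getElem _ _ (by simp [length_hexPad]),
        List.getElem_append_right (by simp [length_hexPad])]
      simp only [length_hexPad, Nat.sub_self, List.getElem_singleton]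
      rw [show i + 1 - 1 - i = 0 from by omega, pow_zero, Nat.div_one]

-- B's pipeline in closed form: the same L-digit hex representation of v >> n
theorem alt_eq_hexPad (a : String) (n : Int) (hhex : a.toList.all isHexChar = true)
    (hn : 0 ≤ n) :
    rightshift_alt a n =
      String.ofList (hexPad a.toList.length (intBase16 a.toList / 2 ^ n.toNat)) := by
  simp only [rightshift_alt]
  set l := a.toList with hl
  set L := l.length with hL
  set v := intBase16 l with hv
  have hvlt : v < 16 ^ L := intBase16_lt l
  set qN := n.toNat / 4 with hqN
  set rN := n.toNat % 4 with hrN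
  have hq : PySem.Int.floordiv n 4 = (qN : Int) := by
    rw [PySem.Int.floordiv_eq_ediv_of_pos (by norm_num)]; omega
  have hr : PySem.Int.mod n 4 = (rN : Int) := by
    rw [PySem.Int.mod_eq_emod_of_pos (by norm_num)]; omega
  have hrlt : rN < 4 := Nat.mod_lt _ (by norm_num)
  have hnN : n.toNat = 4 * qN + rN := by omega
  rw [hq, hr, Int.toNat_natCast]
  congr 1
  apply List.ext_getElem
  · simp [length_hexPad]
  · intro i h1 h2
    have hiL : i < L := by simpa using h1
    simp only [List.getElem_map, List.getElem_range]
    rw [← List.getD_eq_getElem (hexPad L (v / 2 ^ n.toNat)) '0']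
    by_cases hcase : i < qN
    · -- output digit entirely below the shifted-in zeros
      rw [digB_neg _ _ (by omega), digB_neg _ _ (by omega)]
      have hzero : v / 2 ^ n.toNat / 16 ^ (L - 1 - i) = 0 := by
        apply Nat.div_eq_of_lt
        have step1 : v / 2 ^ n.toNat ≤ v / 16 ^ (i + 1) := by
          rw [pow16]
          exact Nat.div_le_div_left (Nat.pow_le_pow_right (by norm_num) (by omega)) (by positivity)
        have step2 : v / 16 ^ (i + 1) < 16 ^ (L - 1 - i) := by
          apply Nat.div_lt_of_lt_mul
          calc v < 16 ^ L := hvlt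
            _ ≤ 16 ^ ((i + 1) + (L - 1 - i)) := Nat.pow_le_pow_right (by norm_num) (by omega)
            _ = 16 ^ (i + 1) * 16 ^ (L - 1 - i) := by rw [pow_add]
        omega
      have hdig : v / 2 ^ n.toNat / 16 ^ (L - 1 - i) % 16 = 0 := by rw [hzero]
      rw [show (hexPad L (v / 2 ^ n.toNat)).getD i '0'
            = hexChar (v / 2 ^ n.toNat / 16 ^ (L - 1 - i) % 16) from hexPad_getD L _ i hiL,
        hdig]
      have h0 : (0 * 16 + 0) >>> rN % 16 = 0 := by simp [Nat.shiftRight_eq_div_pow]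
      rw [h0]
      decide
    · -- output digit i comes from input digits j-1 and j, j = i - qN
      set j := i - qN with hj
      have hjL : j < L := by omega
      have e2 : (i : Int) - qN = (j : Int) := by omega
      have hhex' : ∀ k : Nat, k < L → isHexChar (l.getD k '0') = true := by
        intro k hk
        have := List.all_eq_true.mp hhex (l.getD k '0')
          (by rw [List.getD_eq_getElem _ _ hk]; exact List.getElem_mem hk)
        exact this
      rw [e2, digB_eq_hexVal l j hjL (hhex' j hjL)]
      set y := v / 16 ^ (L - 1 - j) with hy
      have hcur : hexVal (l.getD j '0') = y % 16 := (digit_intBase16 l j hjL).symm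
      have hy16 : y / 16 = v / 16 ^ (L - j) := by
        rw [hy, Nat.div_div_eq_div_mul, ← pow_succ, show L - 1 - j + 1 = L - j from by omega]
      have hprev : digB l ((j : Int) - 1) = y / 16 % 16 := by
        by_cases hj0 : j = 0
        · rw [digB_neg _ _ (by omega)]
          rw [hy16, hj0, Nat.sub_zero, Nat.div_eq_of_lt hvlt]
        · have e1 : (j : Int) - 1 = ((j - 1 : Nat) : Int) := by push_cast; omega
          rw [e1, digB_eq_hexVal l (j - 1) (by omega) (hhex' _ (by omega))]
          rw [hy16, show L - j = L - 1 - (j - 1) from by omega]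
          exact (digit_intBase16 l (j - 1) (by omega)).symm
      rw [hprev, hcur, Nat.shiftRight_eq_div_pow]
      have hcomb : y / 16 % 16 * 16 + y % 16 = y % 256 := by omega
      rw [hcomb]
      have htarget : v / 2 ^ n.toNat / 16 ^ (L - 1 - i) = y / 2 ^ rN := by
        rw [Nat.div_div_eq_div_mul, hy, Nat.div_div_eq_div_mul]
        congr 1
        rw [pow16, pow16, ← pow_add, ← pow_add]
        congr 1
        omega
      have hfold : y % 256 / 2 ^ rN % 16 = y / 2 ^ rN % 16 := by
        interval_cases rN <;> omega
      rw [hfold, ← htarget]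
      rw [show (hexPad L (v / 2 ^ n.toNat)).getD i '0'
            = hexChar (v / 2 ^ n.toNat / 16 ^ (L - 1 - i) % 16) from hexPad_getD L _ i hiL]
      exact hexdB_getD _ (Nat.mod_lt _ (by norm_num))


-- ===== VERDICT (by name: the statement is the Claim_ definition above) =====
theorem rightshift_spec : Claim_equal_rightshift := by
  intro a n _hdom hpre
  obtain ⟨hhex, hn⟩ := hpre
  unfold Spec_rightshift
  by_cases hempty : a.toList = []
  · simp [rightshift, rightshift_alt, hempty, STRhex2binA, STRbin2hexA]
  · have hn' : 0 ≤ n := hn.resolve_left hempty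
    rw [A_eq_hexPad a n hn', alt_eq_hexPad a n hhex hn']
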